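-- pv_equiv track=rewrite | github.com/rbewoor/thesis_2020 | Files_Code_Etc/comb_functional_mic_stt_idKey_queryNeo_imgSelect_imgCap_10A.py | replace_certain_words
-- ===== SOURCE A (Python) =====
-- def replace_certain_words(_sent):
--     """
--     The labels for the objects detected are pre-defined with some words being two words joined.
--     E.g. pottedplant , tvmonitor , handbag , diningtable
--     Deepspeech will correctly output two words when they are spoken. If they remain two words, the
--     Id Key Elements stage will treat them as different words and the match up against predefined
--     labels will fail.
--     So combine them after the inference is done now as the updated inference.
--     """
--     replace_map = (
--         (r'hand bag', r'handbag'),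
--         (r'television monitor', r'tvmonitor'),
--         (r'dining table', r'diningtable'),
--         (r'potted plant', r'pottedplant')
--     )
--     updated_sent = ''.join(_sent)
--     for pair in replace_map:
--         rep_this, rep_with = pair
--         updated_sent = updated_sent.replace(rep_this, rep_with)
--     return updated_sent
-- ===== SOURCE B (Python) =====
-- _REPL = (('hand bag', 'handbag'), ('television monitor', 'tvmonitor'),
--          ('dining table', 'diningtable'), ('potted plant', 'pottedplant'))
--
-- def replace_certain_words(_sent):
--     s = ''.join(_sent)
--     out = []
--     i = 0
--     n = len(s)
--     while i < n:
--         for pat, rep in _REPL: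
--             if s.startswith(pat, i):
--                 out.append(rep)
--                 i += len(pat)
--                 break
--         else:
--             out.append(s[i])
--             i += 1
--     return ''.join(out)
-- ===== Notes on version B (the rewrite author's own statement) =====
-- stated objective: alternative
-- what changed: A makes four sequential full-string .replace passes; B makes one left-to-right scan over the string, trying the four phrases at each position and emitting the replacement of the first (leftmost) match.
-- intended difference: On inputs containing 'potted plantelevision monitor' (overlapping occurrences of 'potted plant' and 'television monitor' sharing one 't'), A's fixed pass order replaces both overlapping phrases (e.g. returns 'pottedplantvmonitor'), while B replaces the leftmost phrase and leaves 'elevision monitor' untouched ('pottedplantelevision monitor'), the intended leftmost-match behaviour. — e.g. on replace_certain_words("potted plantelevision monitor"): A returns "pottedplantvmonitor", B returns "pottedplantelevision monitor"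
import Mathlib
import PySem

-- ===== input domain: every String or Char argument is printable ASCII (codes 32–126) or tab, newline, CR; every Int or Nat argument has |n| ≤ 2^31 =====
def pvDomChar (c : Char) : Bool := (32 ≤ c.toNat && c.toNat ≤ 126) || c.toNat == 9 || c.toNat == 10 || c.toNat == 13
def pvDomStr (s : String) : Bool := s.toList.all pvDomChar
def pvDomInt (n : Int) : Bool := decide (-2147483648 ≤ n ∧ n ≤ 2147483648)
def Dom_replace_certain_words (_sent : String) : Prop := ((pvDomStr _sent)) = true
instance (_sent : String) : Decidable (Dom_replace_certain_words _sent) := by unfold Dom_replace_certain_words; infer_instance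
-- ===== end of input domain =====

-- B replaces A's four sequential full-string `.replace` passes by a single left-to-right scan with a
-- first-match table (objective: alternative, one pass instead of four); on the overlapping corner
-- "potted plantelevision monitor" the two strategies legitimately differ (see D_ below).

-- ===== PORT A =====
def pvReplaceMap : List (String × String) :=
  [("hand bag", "handbag"), ("television monitor", "tvmonitor"),
   ("dining table", "diningtable"), ("potted plant", "pottedplant")]

def replace_certain_words (_sent : String) : String :=
  -- updated_sent = ''.join(_sent)  (joining the characters of a str)
  let updated_sent := PySem.Str.join "" (_sent.toList.map (fun c => String.ofList [c]))
  -- for pair in replace_map: updated_sent = updated_sent.replace(rep_this, rep_with)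
  pvReplaceMap.foldl (fun acc pair => PySem.Str.replace acc pair.1 pair.2) updated_sent

-- ===== PORT B =====
def pvRepsB : List (List Char × List Char) :=
  [("hand bag".toList, "handbag".toList), ("television monitor".toList, "tvmonitor".toList),
   ("dining table".toList, "diningtable".toList), ("potted plant".toList, "pottedplant".toList)]

-- Source B's inner `for pat, rep in _REPL: if s.startswith(pat, i): … break / else:` loop
def pvFirstMatch (reps : List (List Char × List Char)) (s : List Char) : Option (List Char × Nat) :=
  match reps with
  | [] => none
  | (pat, rep) :: rest => if pat.isPrefixOf s then some (rep, pat.length) else pvFirstMatch rest s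

-- Source B's `while i < n` scan; consuming a match advances i by the pattern length
-- (every pattern in pvRepsB is nonempty, so `List.drop (n-1) t` is `List.drop n (c :: t)`).
def pvScan (s : List Char) : List Char :=
  match s with
  | [] => []
  | c :: t =>
    match pvFirstMatch pvRepsB (c :: t) with
    | some (rep, n) => rep ++ pvScan (List.drop (n - 1) t)
    | none => c :: pvScan t
termination_by s.length
decreasing_by
  · simp only [List.length_cons, List.length_drop]; omega
  · simp only [List.length_cons]; omega

def replace_certain_words_alt (_sent : String) : String :=
  let s := PySem.Str.join "" (_sent.toList.map (fun c => String.ofList [c]))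
  String.ofList (pvScan s.toList)

-- ===== PRECONDITION & SPEC =====
-- On inputs containing "potted plantelevision monitor" (overlapping occurrences of 'potted plant'
-- and 'television monitor' sharing one 't'), A's fixed pass order replaces both overlapping phrases
-- (e.g. 'pottedplantvmonitor'), while B's single left-to-right pass replaces the leftmost phrase and
-- leaves 'elevision monitor' untouched, the intended leftmost-match behaviour.
def D_replace_certain_words (_sent : String) : Prop :=
  PySem.Str.isIn "potted plantelevision monitor" _sent = true
instance (_sent : String) : Decidable (D_replace_certain_words _sent) := by
  unfold D_replace_certain_words; infer_instance

def Spec_replace_certain_words (_sent : String) (out : String) : Prop :=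
  ¬ D_replace_certain_words _sent → out = replace_certain_words_alt _sent
instance (_sent : String) (out : String) : Decidable (Spec_replace_certain_words _sent out) := by
  unfold Spec_replace_certain_words; infer_instance

def pvDiffWitness_replace_certain_words : String := "potted plantelevision monitor"
def pvDiffWitnessOut_replace_certain_words : String × String :=
  ("pottedplantvmonitor", "pottedplantelevision monitor")

-- ===== CLAIM (what is proved, stated in full; the proofs are below) =====
def Claim_unchanged_replace_certain_words : Prop :=
  ∀ (_sent : String), Dom_replace_certain_words _sent →
    Spec_replace_certain_words _sent (replace_certain_words _sent)
def Claim_changed_replace_certain_words : Prop :=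
  Dom_replace_certain_words (pvDiffWitness_replace_certain_words) ∧
  D_replace_certain_words (pvDiffWitness_replace_certain_words) ∧
  replace_certain_words (pvDiffWitness_replace_certain_words) = pvDiffWitnessOut_replace_certain_words.1 ∧
  replace_certain_words_alt (pvDiffWitness_replace_certain_words) = pvDiffWitnessOut_replace_certain_words.2 ∧
  pvDiffWitnessOut_replace_certain_words.1 ≠ pvDiffWitnessOut_replace_certain_words.2
def Claim_exact_replace_certain_words : Prop :=
  ∀ (_sent : String), Dom_replace_certain_words _sent → D_replace_certain_words _sent →
    replace_certain_words _sent ≠ replace_certain_words_alt _sent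

-- ===== LEMMAS AND PROOFS =====

theorem pvJoin_toList (w : String) :
    (PySem.Str.join "" (w.toList.map (fun c => String.ofList [c]))).toList = w.toList := by
  simp [PySem.Str.toList_join, List.map_map, Function.comp_def, PySem.Chars.join_nil_singletons]

-- Python's s.replace(old, new) for a NONEMPTY old, as a plain structural recursion.
def pvRepl (p0 : Char) (ps new : List Char) (s : List Char) : List Char :=
  match s with
  | [] => []
  | c :: t =>
    if (p0 :: ps).isPrefixOf (c :: t) then new ++ pvRepl p0 ps new (List.drop ps.length t)
    else c :: pvRepl p0 ps new t
termination_by s.length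
decreasing_by
  · simp only [List.length_cons, List.length_drop]; omega
  · simp only [List.length_cons]; omega

theorem pvRepl_nil (p0 : Char) (ps new : List Char) : pvRepl p0 ps new [] = [] := by
  simp [pvRepl]

theorem pvRepl_pos (p0 : Char) (ps new : List Char) (c : Char) (t : List Char)
    (h : (p0 :: ps) <+: (c :: t)) :
    pvRepl p0 ps new (c :: t) = new ++ pvRepl p0 ps new (List.drop ps.length t) := by
  simp [pvRepl, List.isPrefixOf_iff_prefix, h]

theorem pvRepl_neg (p0 : Char) (ps new : List Char) (c : Char) (t : List Char)
    (h : ¬ (p0 :: ps) <+: (c :: t)) :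
    pvRepl p0 ps new (c :: t) = c :: pvRepl p0 ps new t := by
  simp [pvRepl, List.isPrefixOf_iff_prefix, h]

theorem pvReplace_go_eq (p0 : Char) (ps new : List Char) :
    ∀ (fuel : Nat) (l acc : List Char), l.length ≤ fuel →
      PySem.Chars.replace.go (p0 :: ps) new fuel l acc = acc.reverse ++ pvRepl p0 ps new l := by
  intro fuel
  induction fuel with
  | zero =>
    intro l acc h
    have hl : l = [] := by cases l <;> simp_all
    subst hl
    simp [PySem.Chars.replace.go, pvRepl]
  | succ n ih =>
    intro l acc h
    cases l with
    | nil => simp [PySem.Chars.replace.go, pvRepl]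
    | cons c t =>
      rw [PySem.Chars.replace.go]
      by_cases hp : (p0 :: ps).isPrefixOf (c :: t)
      · simp only [hp, if_true]
        have hlen : (List.drop (p0 :: ps).length (c :: t)).length ≤ n := by
          simp only [List.length_drop, List.length_cons] at *
          omega
        rw [ih _ _ hlen]
        have hdrop : List.drop (p0 :: ps).length (c :: t) = List.drop ps.length t := by
          simp [List.length_cons]
        rw [hdrop, pvRepl_pos p0 ps new c t (List.isPrefixOf_iff_prefix.mp hp)]
        simp
      · simp only [hp, if_false]
        have hlen : t.length ≤ n := by simp only [List.length_cons] at h; omega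
        rw [ih _ _ hlen,
          pvRepl_neg p0 ps new c t (fun hpre => hp (List.isPrefixOf_iff_prefix.mpr hpre))]
        simp

theorem pvReplace_eq (p0 : Char) (ps new s : List Char) :
    PySem.Chars.replace s (p0 :: ps) new = pvRepl p0 ps new s := by
  rw [PySem.Chars.replace]
  simp only [List.isEmpty_cons, if_false, Bool.false_eq_true]
  rw [pvReplace_go_eq p0 ps new s.length s [] le_rfl]
  simp

-- the pattern does not match anywhere strictly inside a ++ (the given continuation)
theorem pvRepl_append (p0 : Char) (ps new : List Char) :
    ∀ (a t : List Char), (∀ k, k < a.length → ¬ (p0 :: ps) <+: (a.drop k ++ t)) →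
      pvRepl p0 ps new (a ++ t) = a ++ pvRepl p0 ps new t := by
  intro a
  induction a with
  | nil => intro t _; simp
  | cons c a' ih =>
    intro t H
    have h0 : ¬ (p0 :: ps) <+: (c :: (a' ++ t)) := by
      have := H 0 (by simp)
      simpa using this
    rw [List.cons_append, pvRepl_neg _ _ _ _ _ h0,
      ih t (fun k hk => by
        have := H (k + 1) (by simp only [List.length_cons]; omega)
        simpa using this)]
    simp

-- decidable sufficient condition for pvRepl_append's hypothesis, t-independent
def pvSafe (p a : List Char) (m : Nat) : Bool :=
  (List.range m).all (fun k => !(p.isPrefixOf (a.drop k)) && !((a.drop k).isPrefixOf p))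

theorem pvSafe_imp (p a : List Char) (m : Nat) (h : pvSafe p a m = true) :
    ∀ k, k < m → ∀ t, ¬ p <+: (a.drop k ++ t) := by
  intro k hk t hpre
  simp only [pvSafe, List.all_eq_true, List.mem_range, Bool.and_eq_true, Bool.not_eq_true',
    Bool.not_eq_true] at h
  obtain ⟨h1, h2⟩ := h k hk
  rcases List.prefix_or_prefix_of_prefix hpre (List.prefix_append (a.drop k) t) with hc | hc
  · rw [← List.isPrefixOf_iff_prefix] at hc; simp [hc] at h1
  · rw [← List.isPrefixOf_iff_prefix] at hc; simp [hc] at h2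

-- preservation: a prefix q of pvRepl's output that cannot begin inside an inserted `new`
-- block (except where it is also a prefix of the pattern) was already a prefix of the input
def pvKeep (new p q : List Char) : Bool :=
  (List.range q.length).all
    (fun k => !(new.isPrefixOf (q.drop k)) &&
      (!((q.drop k).isPrefixOf new) || (q.drop k).isPrefixOf p))

theorem pvKeep_tail (new p : List Char) (c : Char) (q : List Char)
    (h : pvKeep new p (c :: q) = true) : pvKeep new p q = true := by
  simp only [pvKeep, List.all_eq_true, List.mem_range] at h ⊢
  intro k hk
  have := h (k + 1) (by simp only [List.length_cons]; omega)
  simpa using this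

theorem pvPreserve (p0 : Char) (ps new : List Char) :
    ∀ (t q : List Char), pvKeep new (p0 :: ps) q = true →
      q <+: pvRepl p0 ps new t → q <+: t := by
  have aux : ∀ (n : Nat) (t q : List Char), t.length ≤ n → pvKeep new (p0 :: ps) q = true →
      q <+: pvRepl p0 ps new t → q <+: t := by
    intro n
    induction n with
    | zero =>
      intro t q hl _ hpre
      have ht : t = [] := by cases t <;> simp_all
      subst ht
      simpa [pvRepl_nil] using hpre
    | succ n ih =>
      intro t q hl hk hpre
      cases t with
      | nil => simpa [pvRepl_nil] using hpre
      | cons c t' =>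
        by_cases hp : (p0 :: ps) <+: (c :: t')
        · rw [pvRepl_pos _ _ _ _ _ hp] at hpre
          cases q with
          | nil => exact List.nil_prefix
          | cons q0 q1 =>
            rcases List.prefix_or_prefix_of_prefix hpre (List.prefix_append new _) with hc | hc
            · -- q <+: new, hence (by pvKeep at k = 0) q <+: pattern <+: t
              simp only [pvKeep, List.all_eq_true, List.mem_range] at hk
              have h0 := hk 0 (by simp)
              simp only [List.drop_zero, Bool.and_eq_true, Bool.or_eq_true, Bool.not_eq_true',
                Bool.not_eq_true] at h0
              rcases h0.2 with hnp | hqp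
              · rw [← List.isPrefixOf_iff_prefix] at hc; simp [hc] at hnp
              · exact (List.isPrefixOf_iff_prefix.mp hqp).trans hp
            · -- new <+: q contradicts pvKeep at k = 0
              simp only [pvKeep, List.all_eq_true, List.mem_range] at hk
              have h0 := hk 0 (by simp)
              rw [← List.isPrefixOf_iff_prefix] at hc
              simp [hc] at h0
        · rw [pvRepl_neg _ _ _ _ _ hp] at hpre
          cases q with
          | nil => exact List.nil_prefix
          | cons q0 q1 =>
            rw [List.cons_prefix_cons] at hpre
            obtain ⟨hq0, hq1⟩ := hpre
            have := ih t' q1 (by simp only [List.length_cons] at hl; omega)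
              (pvKeep_tail _ _ _ _ hk) hq1
            exact List.cons_prefix_cons.mpr ⟨hq0, this⟩
  intro t q hk hpre
  exact aux t.length t q le_rfl hk hpre

-- the four replacement passes of A, over List Char
def pvF1 (s : List Char) : List Char := pvRepl 'h' "and bag".toList "handbag".toList s
def pvF2 (s : List Char) : List Char := pvRepl 't' "elevision monitor".toList "tvmonitor".toList s
def pvF3 (s : List Char) : List Char := pvRepl 'd' "ining table".toList "diningtable".toList s
def pvF4 (s : List Char) : List Char := pvRepl 'p' "otted plant".toList "pottedplant".toList s
def pvComp (s : List Char) : List Char := pvF4 (pvF3 (pvF2 (pvF1 s)))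

theorem pvRepl_head (p0 : Char) (ps new u : List Char) :
    pvRepl p0 ps new ((p0 :: ps) ++ u) = new ++ pvRepl p0 ps new u := by
  rw [List.cons_append,
    pvRepl_pos _ _ _ _ _ (by rw [← List.cons_append]; exact List.prefix_append _ _),
    List.drop_left]

theorem pvScan_nil : pvScan [] = [] := by simp [pvScan]

theorem pvScan_m1 (u : List Char) :
    pvScan ("hand bag".toList ++ u) = "handbag".toList ++ pvScan u := by
  have hb : ("hand bag".toList).isPrefixOf ('h' :: ("and bag".toList ++ u)) = true :=
    List.isPrefixOf_iff_prefix.mpr (show "hand bag".toList <+: "hand bag".toList ++ u from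
      List.prefix_append _ _)
  rw [show "hand bag".toList ++ u = 'h' :: ("and bag".toList ++ u) from rfl]
  simp only [pvScan, pvFirstMatch, pvRepsB, hb, if_true]
  rw [show ("hand bag".toList).length - 1 = ("and bag".toList).length from rfl, List.drop_left]

theorem pvScan_m2 (u : List Char)
    (h1 : ¬ "hand bag".toList <+: "television monitor".toList ++ u) :
    pvScan ("television monitor".toList ++ u) = "tvmonitor".toList ++ pvScan u := by
  have hb1 : ("hand bag".toList).isPrefixOf ('t' :: ("elevision monitor".toList ++ u)) = false := by
    rw [Bool.eq_false_iff]
    intro hx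
    exact h1 (List.isPrefixOf_iff_prefix.mp hx)
  have hb2 : ("television monitor".toList).isPrefixOf ('t' :: ("elevision monitor".toList ++ u)) = true :=
    List.isPrefixOf_iff_prefix.mpr
      (show "television monitor".toList <+: "television monitor".toList ++ u from
        List.prefix_append _ _)
  rw [show "television monitor".toList ++ u = 't' :: ("elevision monitor".toList ++ u) from rfl]
  simp only [pvScan, pvFirstMatch, pvRepsB, hb1, hb2, if_true, Bool.false_eq_true, if_false]
  rw [show ("television monitor".toList).length - 1 = ("elevision monitor".toList).length from rfl,
    List.drop_left]

theorem pvScan_m3 (u : List Char)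
    (h1 : ¬ "hand bag".toList <+: "dining table".toList ++ u)
    (h2 : ¬ "television monitor".toList <+: "dining table".toList ++ u) :
    pvScan ("dining table".toList ++ u) = "diningtable".toList ++ pvScan u := by
  have hb1 : ("hand bag".toList).isPrefixOf ('d' :: ("ining table".toList ++ u)) = false := by
    rw [Bool.eq_false_iff]
    intro hx
    exact h1 (List.isPrefixOf_iff_prefix.mp hx)
  have hb2 : ("television monitor".toList).isPrefixOf ('d' :: ("ining table".toList ++ u)) = false := by
    rw [Bool.eq_false_iff]
    intro hx
    exact h2 (List.isPrefixOf_iff_prefix.mp hx)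
  have hb3 : ("dining table".toList).isPrefixOf ('d' :: ("ining table".toList ++ u)) = true :=
    List.isPrefixOf_iff_prefix.mpr
      (show "dining table".toList <+: "dining table".toList ++ u from List.prefix_append _ _)
  rw [show "dining table".toList ++ u = 'd' :: ("ining table".toList ++ u) from rfl]
  simp only [pvScan, pvFirstMatch, pvRepsB, hb1, hb2, hb3, if_true, Bool.false_eq_true, if_false]
  rw [show ("dining table".toList).length - 1 = ("ining table".toList).length from rfl,
    List.drop_left]

theorem pvScan_m4 (u : List Char)
    (h1 : ¬ "hand bag".toList <+: "potted plant".toList ++ u)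
    (h2 : ¬ "television monitor".toList <+: "potted plant".toList ++ u)
    (h3 : ¬ "dining table".toList <+: "potted plant".toList ++ u) :
    pvScan ("potted plant".toList ++ u) = "pottedplant".toList ++ pvScan u := by
  have hb1 : ("hand bag".toList).isPrefixOf ('p' :: ("otted plant".toList ++ u)) = false := by
    rw [Bool.eq_false_iff]
    intro hx
    exact h1 (List.isPrefixOf_iff_prefix.mp hx)
  have hb2 : ("television monitor".toList).isPrefixOf ('p' :: ("otted plant".toList ++ u)) = false := by
    rw [Bool.eq_false_iff]
    intro hx
    exact h2 (List.isPrefixOf_iff_prefix.mp hx)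
  have hb3 : ("dining table".toList).isPrefixOf ('p' :: ("otted plant".toList ++ u)) = false := by
    rw [Bool.eq_false_iff]
    intro hx
    exact h3 (List.isPrefixOf_iff_prefix.mp hx)
  have hb4 : ("potted plant".toList).isPrefixOf ('p' :: ("otted plant".toList ++ u)) = true :=
    List.isPrefixOf_iff_prefix.mpr
      (show "potted plant".toList <+: "potted plant".toList ++ u from List.prefix_append _ _)
  rw [show "potted plant".toList ++ u = 'p' :: ("otted plant".toList ++ u) from rfl]
  simp only [pvScan, pvFirstMatch, pvRepsB, hb1, hb2, hb3, hb4, if_true, Bool.false_eq_true, if_false]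
  rw [show ("potted plant".toList).length - 1 = ("otted plant".toList).length from rfl,
    List.drop_left]

theorem pvScan_none (c : Char) (t : List Char)
    (h1 : ¬ "hand bag".toList <+: c :: t)
    (h2 : ¬ "television monitor".toList <+: c :: t)
    (h3 : ¬ "dining table".toList <+: c :: t)
    (h4 : ¬ "potted plant".toList <+: c :: t) :
    pvScan (c :: t) = c :: pvScan t := by
  have hb1 : ("hand bag".toList).isPrefixOf (c :: t) = false := by
    rw [Bool.eq_false_iff]; intro hx; exact h1 (List.isPrefixOf_iff_prefix.mp hx)
  have hb2 : ("television monitor".toList).isPrefixOf (c :: t) = false := by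
    rw [Bool.eq_false_iff]; intro hx; exact h2 (List.isPrefixOf_iff_prefix.mp hx)
  have hb3 : ("dining table".toList).isPrefixOf (c :: t) = false := by
    rw [Bool.eq_false_iff]; intro hx; exact h3 (List.isPrefixOf_iff_prefix.mp hx)
  have hb4 : ("potted plant".toList).isPrefixOf (c :: t) = false := by
    rw [Bool.eq_false_iff]; intro hx; exact h4 (List.isPrefixOf_iff_prefix.mp hx)
  simp only [pvScan, pvFirstMatch, pvRepsB, hb1, hb2, hb3, hb4, Bool.false_eq_true, if_false]

def pvMagic : List Char := "potted plantelevision monitor".toList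

theorem pvMain : ∀ (s : List Char), ¬ pvMagic <:+: s → pvComp s = pvScan s := by
  have aux : ∀ (n : Nat) (s : List Char), s.length ≤ n → ¬ pvMagic <:+: s →
      pvComp s = pvScan s := by
    intro n
    induction n with
    | zero =>
      intro s hl _
      have hs : s = [] := by cases s <;> simp_all
      subst hs
      simp [pvComp, pvF1, pvF2, pvF3, pvF4, pvRepl_nil, pvScan_nil]
    | succ n ih =>
      intro s hl hm
      cases s with
      | nil => simp [pvComp, pvF1, pvF2, pvF3, pvF4, pvRepl_nil, pvScan_nil]
      | cons c t =>
        by_cases h1 : "hand bag".toList <+: c :: t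
        · -- 'hand bag' matches at the head
          obtain ⟨u, hu⟩ := h1
          rw [← hu] at hl hm ⊢
          have hlu : u.length ≤ n := by
            simp only [List.length_append,
              show ("hand bag".toList).length = 8 from rfl] at hl
            omega
          have hmu : ¬ pvMagic <:+: u := fun hi => hm (hi.trans ⟨"hand bag".toList, [], by simp⟩)
          show pvF4 (pvF3 (pvF2 (pvF1 ("hand bag".toList ++ u)))) = _
          rw [show pvF1 ("hand bag".toList ++ u) = "handbag".toList ++ pvF1 u from
              pvRepl_head 'h' "and bag".toList "handbag".toList u,
            show pvF2 ("handbag".toList ++ pvF1 u) = "handbag".toList ++ pvF2 (pvF1 u) from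
              pvRepl_append 't' "elevision monitor".toList "tvmonitor".toList _ _
                (fun k hk => pvSafe_imp "television monitor".toList "handbag".toList 7
                  (by decide) k hk _),
            show pvF3 ("handbag".toList ++ pvF2 (pvF1 u)) = "handbag".toList ++ pvF3 (pvF2 (pvF1 u)) from
              pvRepl_append 'd' "ining table".toList "diningtable".toList _ _
                (fun k hk => pvSafe_imp "dining table".toList "handbag".toList 7
                  (by decide) k hk _),
            show pvF4 ("handbag".toList ++ pvF3 (pvF2 (pvF1 u))) =
                "handbag".toList ++ pvF4 (pvF3 (pvF2 (pvF1 u))) from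
              pvRepl_append 'p' "otted plant".toList "pottedplant".toList _ _
                (fun k hk => pvSafe_imp "potted plant".toList "handbag".toList 7
                  (by decide) k hk _),
            show pvF4 (pvF3 (pvF2 (pvF1 u))) = pvComp u from rfl,
            ih u hlu hmu, pvScan_m1]
        · by_cases h2 : "television monitor".toList <+: c :: t
          · -- 'television monitor' matches at the head
            obtain ⟨u, hu⟩ := h2
            rw [← hu] at hl hm h1 ⊢
            have hlu : u.length ≤ n := by
              simp only [List.length_append,
                show ("television monitor".toList).length = 18 from rfl] at hl
              omega
            have hmu : ¬ pvMagic <:+: u := fun hi =>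
              hm (hi.trans ⟨"television monitor".toList, [], by simp⟩)
            show pvF4 (pvF3 (pvF2 (pvF1 ("television monitor".toList ++ u)))) = _
            rw [show pvF1 ("television monitor".toList ++ u) =
                  "television monitor".toList ++ pvF1 u from
                pvRepl_append 'h' "and bag".toList "handbag".toList _ _
                  (fun k hk => pvSafe_imp "hand bag".toList "television monitor".toList 18
                    (by decide) k hk _),
              show pvF2 ("television monitor".toList ++ pvF1 u) =
                  "tvmonitor".toList ++ pvF2 (pvF1 u) from
                pvRepl_head 't' "elevision monitor".toList "tvmonitor".toList (pvF1 u),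
              show pvF3 ("tvmonitor".toList ++ pvF2 (pvF1 u)) =
                  "tvmonitor".toList ++ pvF3 (pvF2 (pvF1 u)) from
                pvRepl_append 'd' "ining table".toList "diningtable".toList _ _
                  (fun k hk => pvSafe_imp "dining table".toList "tvmonitor".toList 9
                    (by decide) k hk _),
              show pvF4 ("tvmonitor".toList ++ pvF3 (pvF2 (pvF1 u))) =
                  "tvmonitor".toList ++ pvF4 (pvF3 (pvF2 (pvF1 u))) from
                pvRepl_append 'p' "otted plant".toList "pottedplant".toList _ _
                  (fun k hk => pvSafe_imp "potted plant".toList "tvmonitor".toList 9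
                    (by decide) k hk _),
              show pvF4 (pvF3 (pvF2 (pvF1 u))) = pvComp u from rfl,
              ih u hlu hmu, pvScan_m2 u h1]
          · by_cases h3 : "dining table".toList <+: c :: t
            · -- 'dining table' matches at the head
              obtain ⟨u, hu⟩ := h3
              rw [← hu] at hl hm h1 h2 ⊢
              have hlu : u.length ≤ n := by
                simp only [List.length_append,
                  show ("dining table".toList).length = 12 from rfl] at hl
                omega
              have hmu : ¬ pvMagic <:+: u := fun hi =>
                hm (hi.trans ⟨"dining table".toList, [], by simp⟩)
              show pvF4 (pvF3 (pvF2 (pvF1 ("dining table".toList ++ u)))) = _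
              rw [show pvF1 ("dining table".toList ++ u) = "dining table".toList ++ pvF1 u from
                  pvRepl_append 'h' "and bag".toList "handbag".toList _ _
                    (fun k hk => pvSafe_imp "hand bag".toList "dining table".toList 12
                      (by decide) k hk _),
                show pvF2 ("dining table".toList ++ pvF1 u) =
                    "dining table".toList ++ pvF2 (pvF1 u) from
                  pvRepl_append 't' "elevision monitor".toList "tvmonitor".toList _ _
                    (fun k hk => pvSafe_imp "television monitor".toList "dining table".toList 12
                      (by decide) k hk _),
                show pvF3 ("dining table".toList ++ pvF2 (pvF1 u)) =
                    "diningtable".toList ++ pvF3 (pvF2 (pvF1 u)) from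
                  pvRepl_head 'd' "ining table".toList "diningtable".toList _,
                show pvF4 ("diningtable".toList ++ pvF3 (pvF2 (pvF1 u))) =
                    "diningtable".toList ++ pvF4 (pvF3 (pvF2 (pvF1 u))) from
                  pvRepl_append 'p' "otted plant".toList "pottedplant".toList _ _
                    (fun k hk => pvSafe_imp "potted plant".toList "diningtable".toList 11
                      (by decide) k hk _),
                show pvF4 (pvF3 (pvF2 (pvF1 u))) = pvComp u from rfl,
                ih u hlu hmu, pvScan_m3 u h1 h2]
            · by_cases h4 : "potted plant".toList <+: c :: t
              · -- 'potted plant' matches at the head; the k = 11 overlap with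
                -- 'television monitor' is excluded by ¬ pvMagic <:+: s
                obtain ⟨u, hu⟩ := h4
                rw [← hu] at hl hm h1 h2 h3 ⊢
                have hlu : u.length ≤ n := by
                  simp only [List.length_append,
                    show ("potted plant".toList).length = 12 from rfl] at hl
                  omega
                have hmu : ¬ pvMagic <:+: u := fun hi =>
                  hm (hi.trans ⟨"potted plant".toList, [], by simp⟩)
                have H2 : ∀ k, k < ("potted plant".toList).length →
                    ¬ "television monitor".toList <+:
                      (("potted plant".toList).drop k ++ pvF1 u) := by
                  intro k hk hpre
                  by_cases hk11 : k = 11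
                  · subst hk11
                    rw [show ("potted plant".toList).drop 11 = ['t'] from rfl,
                      List.singleton_append,
                      show "television monitor".toList = 't' :: "elevision monitor".toList from rfl,
                      List.cons_prefix_cons] at hpre
                    have hqu := pvPreserve 'h' "and bag".toList "handbag".toList u
                      "elevision monitor".toList (by decide) hpre.2
                    refine hm (List.IsPrefix.isInfix ?_)
                    rw [show "potted plant".toList ++ u =
                        "potted plan".toList ++ ('t' :: u) from by
                        rw [show "potted plant".toList = "potted plan".toList ++ ['t'] from rfl]
                        simp,
                      show pvMagic = "potted plan".toList ++ ('t' :: "elevision monitor".toList)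
                        from rfl]
                    exact ⟨u.drop ("elevision monitor".toList).length, by
                      obtain ⟨w, hw⟩ := hqu
                      simp [← hw, List.drop_left]⟩
                  · have hk12 : k < 12 := hk
                    have hk10 : k < 11 := by omega
                    exact pvSafe_imp "television monitor".toList "potted plant".toList 11
                      (by decide) k hk10 _ hpre
                show pvF4 (pvF3 (pvF2 (pvF1 ("potted plant".toList ++ u)))) = _
                rw [show pvF1 ("potted plant".toList ++ u) = "potted plant".toList ++ pvF1 u from
                    pvRepl_append 'h' "and bag".toList "handbag".toList _ _
                      (fun k hk => pvSafe_imp "hand bag".toList "potted plant".toList 12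
                        (by decide) k hk _),
                  show pvF2 ("potted plant".toList ++ pvF1 u) =
                      "potted plant".toList ++ pvF2 (pvF1 u) from
                    pvRepl_append 't' "elevision monitor".toList "tvmonitor".toList _ _ H2,
                  show pvF3 ("potted plant".toList ++ pvF2 (pvF1 u)) =
                      "potted plant".toList ++ pvF3 (pvF2 (pvF1 u)) from
                    pvRepl_append 'd' "ining table".toList "diningtable".toList _ _
                      (fun k hk => pvSafe_imp "dining table".toList "potted plant".toList 12
                        (by decide) k hk _),
                  show pvF4 ("potted plant".toList ++ pvF3 (pvF2 (pvF1 u))) =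
                      "pottedplant".toList ++ pvF4 (pvF3 (pvF2 (pvF1 u))) from
                    pvRepl_head 'p' "otted plant".toList "pottedplant".toList _,
                  show pvF4 (pvF3 (pvF2 (pvF1 u))) = pvComp u from rfl,
                  ih u hlu hmu, pvScan_m4 u h1 h2 h3]
              · -- no pattern matches at the head
                have hlt : t.length ≤ n := by
                  simp only [List.length_cons] at hl
                  omega
                have hmt : ¬ pvMagic <:+: t := fun hi => hm (List.infix_cons hi)
                have nh2 : ¬ "television monitor".toList <+: c :: pvF1 t := by
                  intro hc
                  rw [show "television monitor".toList = 't' :: "elevision monitor".toList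
                      from rfl, List.cons_prefix_cons] at hc
                  have := pvPreserve 'h' "and bag".toList "handbag".toList t
                    "elevision monitor".toList (by decide) hc.2
                  exact h2 (by
                    rw [show "television monitor".toList = 't' :: "elevision monitor".toList
                      from rfl]
                    exact List.cons_prefix_cons.mpr ⟨hc.1, this⟩)
                have nh3 : ¬ "dining table".toList <+: c :: pvF2 (pvF1 t) := by
                  intro hc
                  rw [show "dining table".toList = 'd' :: "ining table".toList from rfl,
                    List.cons_prefix_cons] at hc
                  have s2 := pvPreserve 't' "elevision monitor".toList "tvmonitor".toList (pvF1 t)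
                    "ining table".toList (by decide) hc.2
                  have s1 := pvPreserve 'h' "and bag".toList "handbag".toList t
                    "ining table".toList (by decide) s2
                  exact h3 (by
                    rw [show "dining table".toList = 'd' :: "ining table".toList from rfl]
                    exact List.cons_prefix_cons.mpr ⟨hc.1, s1⟩)
                have nh4 : ¬ "potted plant".toList <+: c :: pvF3 (pvF2 (pvF1 t)) := by
                  intro hc
                  rw [show "potted plant".toList = 'p' :: "otted plant".toList from rfl,
                    List.cons_prefix_cons] at hc
                  have s3 := pvPreserve 'd' "ining table".toList "diningtable".toList
                    (pvF2 (pvF1 t)) "otted plant".toList (by decide) hc.2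
                  have s2 := pvPreserve 't' "elevision monitor".toList "tvmonitor".toList (pvF1 t)
                    "otted plant".toList (by decide) s3
                  have s1 := pvPreserve 'h' "and bag".toList "handbag".toList t
                    "otted plant".toList (by decide) s2
                  exact h4 (by
                    rw [show "potted plant".toList = 'p' :: "otted plant".toList from rfl]
                    exact List.cons_prefix_cons.mpr ⟨hc.1, s1⟩)
                show pvF4 (pvF3 (pvF2 (pvF1 (c :: t)))) = _
                rw [show pvF1 (c :: t) = c :: pvF1 t from pvRepl_neg _ _ _ _ _ h1,
                  show pvF2 (c :: pvF1 t) = c :: pvF2 (pvF1 t) from pvRepl_neg _ _ _ _ _ nh2,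
                  show pvF3 (c :: pvF2 (pvF1 t)) = c :: pvF3 (pvF2 (pvF1 t)) from
                    pvRepl_neg _ _ _ _ _ nh3,
                  show pvF4 (c :: pvF3 (pvF2 (pvF1 t))) = c :: pvF4 (pvF3 (pvF2 (pvF1 t))) from
                    pvRepl_neg _ _ _ _ _ nh4,
                  show pvF4 (pvF3 (pvF2 (pvF1 t))) = pvComp t from rfl,
                  ih t hlt hmt, pvScan_none c t h1 h2 h3 h4]
  intro s hm
  exact aux s.length s le_rfl hm


-- ===== tightness: A and B differ on every input inside D_ =====

-- an infix of c :: t that is not a prefix is an infix of t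
theorem pvInfix_tail {m : List Char} {c : Char} {t : List Char}
    (hi : m <:+: c :: t) (hp : ¬ m <+: c :: t) : m <:+: t := by
  obtain ⟨pre, post, hh⟩ := hi
  cases pre with
  | nil => exact absurd ⟨post, by simpa using hh⟩ hp
  | cons x pre' =>
    refine ⟨pre', post, ?_⟩
    simp only [List.cons_append, List.cons.injEq] at hh
    exact hh.2

-- an infix of a ++ w that cannot start inside a is an infix of w
theorem pvInfix_shift (m a w : List Char)
    (H : ∀ k, k < a.length → ¬ m <+: a.drop k ++ w) (hi : m <:+: a ++ w) : m <:+: w := by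
  obtain ⟨pre, post, hh⟩ := hi
  have hp : m <+: (a ++ w).drop pre.length :=
    ⟨post, by rw [← hh, List.append_assoc, List.drop_left]⟩
  rw [List.drop_append] at hp
  by_cases hl : a.length ≤ pre.length
  · rw [List.drop_eq_nil_of_le hl, List.nil_append] at hp
    exact hp.isInfix.trans (List.drop_suffix _ _).isInfix
  · rw [Nat.sub_eq_zero_of_le (le_of_not_ge hl), List.drop_zero] at hp
    exact absurd hp (H pre.length (by omega))

-- a block through which no pattern match can start passes through pvScan unchanged
theorem pvScan_through : ∀ (a w : List Char),
    (∀ k, k < a.length → ¬ "hand bag".toList <+: a.drop k ++ w) →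
    (∀ k, k < a.length → ¬ "television monitor".toList <+: a.drop k ++ w) →
    (∀ k, k < a.length → ¬ "dining table".toList <+: a.drop k ++ w) →
    (∀ k, k < a.length → ¬ "potted plant".toList <+: a.drop k ++ w) →
    pvScan (a ++ w) = a ++ pvScan w := by
  intro a
  induction a with
  | nil => intro w _ _ _ _; simp
  | cons c a' ih =>
    intro w H1 H2 H3 H4
    rw [List.cons_append,
      pvScan_none c (a' ++ w) (by simpa using H1 0 (by simp)) (by simpa using H2 0 (by simp))
        (by simpa using H3 0 (by simp)) (by simpa using H4 0 (by simp)),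
      ih w (fun k hk => by simpa using H1 (k + 1) (by simp only [List.length_cons]; omega))
        (fun k hk => by simpa using H2 (k + 1) (by simp only [List.length_cons]; omega))
        (fun k hk => by simpa using H3 (k + 1) (by simp only [List.length_cons]; omega))
        (fun k hk => by simpa using H4 (k + 1) (by simp only [List.length_cons]; omega))]
    simp

theorem pvTight : ∀ (s : List Char), pvMagic <:+: s → pvComp s ≠ pvScan s := by
  have aux : ∀ (n : Nat) (s : List Char), s.length ≤ n → pvMagic <:+: s →
      pvComp s ≠ pvScan s := by
    intro n
    induction n with
    | zero =>
      intro s hl hi _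
      have hs : s = [] := by cases s <;> simp_all
      subst hs
      have := hi.sublist.length_le
      simp [show pvMagic.length = 29 from rfl] at this
    | succ n ih =>
      intro s hl hi
      by_cases hpm : pvMagic <+: s
      · -- the first overlap is right here: A rewrites to …pottedplant ++ vmonitor…,
        -- B to …pottedplant ++ elevision monitor…
        obtain ⟨w, hw⟩ := hpm
        rw [← hw]
        have e1 : ∀ X : List Char,
            pvMagic ++ X = "potted plan".toList ++ ("television monitor".toList ++ X) := by
          intro X
          rw [show pvMagic = "potted plan".toList ++ "television monitor".toList from by decide,
            List.append_assoc]
        have e2 : ∀ Y : List Char,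
            "potted plan".toList ++ ("tvmonitor".toList ++ Y) =
              "potted plant".toList ++ ("vmonitor".toList ++ Y) := by
          intro Y
          rw [← List.append_assoc, ← List.append_assoc,
            show "potted plan".toList ++ "tvmonitor".toList =
              "potted plant".toList ++ "vmonitor".toList from by decide]
        have e3 : pvMagic ++ w = "potted plant".toList ++ ("elevision monitor".toList ++ w) := by
          rw [show pvMagic = "potted plant".toList ++ "elevision monitor".toList from by decide,
            List.append_assoc]
        have step1 : pvF1 (pvMagic ++ w) = pvMagic ++ pvF1 w :=
          pvRepl_append 'h' "and bag".toList "handbag".toList pvMagic w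
            (fun k hk => pvSafe_imp "hand bag".toList pvMagic 29 (by decide) k hk _)
        have step2 : pvF2 (pvMagic ++ pvF1 w) =
            "potted plan".toList ++ ("tvmonitor".toList ++ pvF2 (pvF1 w)) := by
          rw [e1 (pvF1 w),
            show pvF2 ("potted plan".toList ++ ("television monitor".toList ++ pvF1 w)) =
                "potted plan".toList ++ pvF2 ("television monitor".toList ++ pvF1 w) from
              pvRepl_append 't' "elevision monitor".toList "tvmonitor".toList
                "potted plan".toList ("television monitor".toList ++ pvF1 w)
                (fun k hk => pvSafe_imp "television monitor".toList "potted plan".toList 11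
                  (by decide) k hk _),
            show pvF2 ("television monitor".toList ++ pvF1 w) =
                "tvmonitor".toList ++ pvF2 (pvF1 w) from
              pvRepl_head 't' "elevision monitor".toList "tvmonitor".toList (pvF1 w)]
        have step3 : pvF3 ("potted plan".toList ++ ("tvmonitor".toList ++ pvF2 (pvF1 w))) =
            "potted plan".toList ++ ("tvmonitor".toList ++ pvF3 (pvF2 (pvF1 w))) := by
          rw [show pvF3 ("potted plan".toList ++ ("tvmonitor".toList ++ pvF2 (pvF1 w))) =
                "potted plan".toList ++ pvF3 ("tvmonitor".toList ++ pvF2 (pvF1 w)) from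
              pvRepl_append 'd' "ining table".toList "diningtable".toList
                "potted plan".toList ("tvmonitor".toList ++ pvF2 (pvF1 w))
                (fun k hk => pvSafe_imp "dining table".toList "potted plan".toList 11
                  (by decide) k hk _),
            show pvF3 ("tvmonitor".toList ++ pvF2 (pvF1 w)) =
                "tvmonitor".toList ++ pvF3 (pvF2 (pvF1 w)) from
              pvRepl_append 'd' "ining table".toList "diningtable".toList
                "tvmonitor".toList (pvF2 (pvF1 w))
                (fun k hk => pvSafe_imp "dining table".toList "tvmonitor".toList 9
                  (by decide) k hk _)]
        have step4 : pvF4 ("potted plan".toList ++ ("tvmonitor".toList ++ pvF3 (pvF2 (pvF1 w)))) =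
            "pottedplant".toList ++ ("vmonitor".toList ++ pvF4 (pvF3 (pvF2 (pvF1 w)))) := by
          rw [e2 (pvF3 (pvF2 (pvF1 w))),
            show pvF4 ("potted plant".toList ++ ("vmonitor".toList ++ pvF3 (pvF2 (pvF1 w)))) =
                "pottedplant".toList ++ pvF4 ("vmonitor".toList ++ pvF3 (pvF2 (pvF1 w))) from
              pvRepl_head 'p' "otted plant".toList "pottedplant".toList _,
            show pvF4 ("vmonitor".toList ++ pvF3 (pvF2 (pvF1 w))) =
                "vmonitor".toList ++ pvF4 (pvF3 (pvF2 (pvF1 w))) from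
              pvRepl_append 'p' "otted plant".toList "pottedplant".toList
                "vmonitor".toList (pvF3 (pvF2 (pvF1 w)))
                (fun k hk => pvSafe_imp "potted plant".toList "vmonitor".toList 8
                  (by decide) k hk _)]
        have hs1 : ¬ "hand bag".toList <+: "potted plant".toList ++ ("elevision monitor".toList ++ w) := by
          rw [← e3]
          simpa using pvSafe_imp "hand bag".toList pvMagic 1 (by decide) 0 (by omega) w
        have hs2 : ¬ "television monitor".toList <+:
            "potted plant".toList ++ ("elevision monitor".toList ++ w) := by
          rw [← e3]
          simpa using pvSafe_imp "television monitor".toList pvMagic 1 (by decide) 0 (by omega) w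
        have hs3 : ¬ "dining table".toList <+:
            "potted plant".toList ++ ("elevision monitor".toList ++ w) := by
          rw [← e3]
          simpa using pvSafe_imp "dining table".toList pvMagic 1 (by decide) 0 (by omega) w
        have rhs : pvScan (pvMagic ++ w) =
            "pottedplant".toList ++ ("elevision monitor".toList ++ pvScan w) := by
          rw [e3, pvScan_m4 ("elevision monitor".toList ++ w) hs1 hs2 hs3,
            pvScan_through "elevision monitor".toList w
              (fun k hk => pvSafe_imp "hand bag".toList "elevision monitor".toList 17
                (by decide) k hk _)
              (fun k hk => pvSafe_imp "television monitor".toList "elevision monitor".toList 17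
                (by decide) k hk _)
              (fun k hk => pvSafe_imp "dining table".toList "elevision monitor".toList 17
                (by decide) k hk _)
              (fun k hk => pvSafe_imp "potted plant".toList "elevision monitor".toList 17
                (by decide) k hk _)]
        show pvF4 (pvF3 (pvF2 (pvF1 (pvMagic ++ w)))) ≠ pvScan (pvMagic ++ w)
        rw [step1, step2, step3, step4, rhs]
        intro heq
        have h5 : ('v' : Char) :: ("monitor".toList ++ pvF4 (pvF3 (pvF2 (pvF1 w)))) =
            'e' :: ("levision monitor".toList ++ pvScan w) := List.append_cancel_left heq
        injection h5 with h6 _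
        exact absurd h6 (by decide)
      · -- the magic substring lies strictly further right; recurse as in pvMain
        cases s with
        | nil =>
          have := hi.sublist.length_le
          simp [show pvMagic.length = 29 from rfl] at this
        | cons c t =>
          by_cases h1 : "hand bag".toList <+: c :: t
          · obtain ⟨u, hu⟩ := h1
            rw [← hu] at hl hi hpm ⊢
            have hlu : u.length ≤ n := by
              simp only [List.length_append,
                show ("hand bag".toList).length = 8 from rfl] at hl
              omega
            have hiu : pvMagic <:+: u :=
              pvInfix_shift pvMagic "hand bag".toList u
                (fun k hk => pvSafe_imp pvMagic "hand bag".toList 8 (by decide) k hk u) hi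
            show pvF4 (pvF3 (pvF2 (pvF1 ("hand bag".toList ++ u)))) ≠ _
            rw [show pvF1 ("hand bag".toList ++ u) = "handbag".toList ++ pvF1 u from
                pvRepl_head 'h' "and bag".toList "handbag".toList u,
              show pvF2 ("handbag".toList ++ pvF1 u) = "handbag".toList ++ pvF2 (pvF1 u) from
                pvRepl_append 't' "elevision monitor".toList "tvmonitor".toList _ _
                  (fun k hk => pvSafe_imp "television monitor".toList "handbag".toList 7
                    (by decide) k hk _),
              show pvF3 ("handbag".toList ++ pvF2 (pvF1 u)) =
                  "handbag".toList ++ pvF3 (pvF2 (pvF1 u)) from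
                pvRepl_append 'd' "ining table".toList "diningtable".toList _ _
                  (fun k hk => pvSafe_imp "dining table".toList "handbag".toList 7
                    (by decide) k hk _),
              show pvF4 ("handbag".toList ++ pvF3 (pvF2 (pvF1 u))) =
                  "handbag".toList ++ pvF4 (pvF3 (pvF2 (pvF1 u))) from
                pvRepl_append 'p' "otted plant".toList "pottedplant".toList _ _
                  (fun k hk => pvSafe_imp "potted plant".toList "handbag".toList 7
                    (by decide) k hk _),
              show pvF4 (pvF3 (pvF2 (pvF1 u))) = pvComp u from rfl, pvScan_m1]
            intro heq
            exact ih u hlu hiu (List.append_cancel_left heq)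
          · by_cases h2 : "television monitor".toList <+: c :: t
            · obtain ⟨u, hu⟩ := h2
              rw [← hu] at hl hi hpm h1 ⊢
              have hlu : u.length ≤ n := by
                simp only [List.length_append,
                  show ("television monitor".toList).length = 18 from rfl] at hl
                omega
              have hiu : pvMagic <:+: u :=
                pvInfix_shift pvMagic "television monitor".toList u
                  (fun k hk => pvSafe_imp pvMagic "television monitor".toList 18
                    (by decide) k hk u) hi
              show pvF4 (pvF3 (pvF2 (pvF1 ("television monitor".toList ++ u)))) ≠ _
              rw [show pvF1 ("television monitor".toList ++ u) =
                    "television monitor".toList ++ pvF1 u from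
                  pvRepl_append 'h' "and bag".toList "handbag".toList _ _
                    (fun k hk => pvSafe_imp "hand bag".toList "television monitor".toList 18
                      (by decide) k hk _),
                show pvF2 ("television monitor".toList ++ pvF1 u) =
                    "tvmonitor".toList ++ pvF2 (pvF1 u) from
                  pvRepl_head 't' "elevision monitor".toList "tvmonitor".toList (pvF1 u),
                show pvF3 ("tvmonitor".toList ++ pvF2 (pvF1 u)) =
                    "tvmonitor".toList ++ pvF3 (pvF2 (pvF1 u)) from
                  pvRepl_append 'd' "ining table".toList "diningtable".toList _ _
                    (fun k hk => pvSafe_imp "dining table".toList "tvmonitor".toList 9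
                      (by decide) k hk _),
                show pvF4 ("tvmonitor".toList ++ pvF3 (pvF2 (pvF1 u))) =
                    "tvmonitor".toList ++ pvF4 (pvF3 (pvF2 (pvF1 u))) from
                  pvRepl_append 'p' "otted plant".toList "pottedplant".toList _ _
                    (fun k hk => pvSafe_imp "potted plant".toList "tvmonitor".toList 9
                      (by decide) k hk _),
                show pvF4 (pvF3 (pvF2 (pvF1 u))) = pvComp u from rfl, pvScan_m2 u h1]
              intro heq
              exact ih u hlu hiu (List.append_cancel_left heq)
            · by_cases h3 : "dining table".toList <+: c :: t
              · obtain ⟨u, hu⟩ := h3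
                rw [← hu] at hl hi hpm h1 h2 ⊢
                have hlu : u.length ≤ n := by
                  simp only [List.length_append,
                    show ("dining table".toList).length = 12 from rfl] at hl
                  omega
                have hiu : pvMagic <:+: u :=
                  pvInfix_shift pvMagic "dining table".toList u
                    (fun k hk => pvSafe_imp pvMagic "dining table".toList 12
                      (by decide) k hk u) hi
                show pvF4 (pvF3 (pvF2 (pvF1 ("dining table".toList ++ u)))) ≠ _
                rw [show pvF1 ("dining table".toList ++ u) = "dining table".toList ++ pvF1 u from
                    pvRepl_append 'h' "and bag".toList "handbag".toList _ _
                      (fun k hk => pvSafe_imp "hand bag".toList "dining table".toList 12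
                        (by decide) k hk _),
                  show pvF2 ("dining table".toList ++ pvF1 u) =
                      "dining table".toList ++ pvF2 (pvF1 u) from
                    pvRepl_append 't' "elevision monitor".toList "tvmonitor".toList _ _
                      (fun k hk => pvSafe_imp "television monitor".toList "dining table".toList 12
                        (by decide) k hk _),
                  show pvF3 ("dining table".toList ++ pvF2 (pvF1 u)) =
                      "diningtable".toList ++ pvF3 (pvF2 (pvF1 u)) from
                    pvRepl_head 'd' "ining table".toList "diningtable".toList _,
                  show pvF4 ("diningtable".toList ++ pvF3 (pvF2 (pvF1 u))) =
                      "diningtable".toList ++ pvF4 (pvF3 (pvF2 (pvF1 u))) from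
                    pvRepl_append 'p' "otted plant".toList "pottedplant".toList _ _
                      (fun k hk => pvSafe_imp "potted plant".toList "diningtable".toList 11
                        (by decide) k hk _),
                  show pvF4 (pvF3 (pvF2 (pvF1 u))) = pvComp u from rfl, pvScan_m3 u h1 h2]
                intro heq
                exact ih u hlu hiu (List.append_cancel_left heq)
              · by_cases h4 : "potted plant".toList <+: c :: t
                · obtain ⟨u, hu⟩ := h4
                  rw [← hu] at hl hi hpm h1 h2 h3 ⊢
                  have hlu : u.length ≤ n := by
                    simp only [List.length_append,
                      show ("potted plant".toList).length = 12 from rfl] at hl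
                    omega
                  have hqcon : ¬ "elevision monitor".toList <+: u := by
                    intro hq
                    refine hpm ?_
                    rw [show pvMagic = "potted plan".toList ++
                        ('t' :: "elevision monitor".toList) from rfl,
                      show "potted plant".toList ++ u = "potted plan".toList ++ ('t' :: u) from by
                        rw [show "potted plant".toList = "potted plan".toList ++ ['t'] from rfl]
                        simp]
                    obtain ⟨z, hz⟩ := hq
                    exact ⟨z, by rw [← hz]; simp⟩
                  have hiu : pvMagic <:+: u := by
                    have htail : pvMagic <:+: "otted plant".toList ++ u :=
                      pvInfix_tail (by
                        rw [show "potted plant".toList ++ u =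
                          'p' :: ("otted plant".toList ++ u) from rfl] at hi
                        exact hi) (by
                        rw [show "potted plant".toList ++ u =
                          'p' :: ("otted plant".toList ++ u) from rfl] at hpm
                        exact hpm)
                    exact pvInfix_shift pvMagic "otted plant".toList u
                      (fun k hk => pvSafe_imp pvMagic "otted plant".toList 11
                        (by decide) k hk u) htail
                  have H2 : ∀ k, k < ("potted plant".toList).length →
                      ¬ "television monitor".toList <+:
                        (("potted plant".toList).drop k ++ pvF1 u) := by
                    intro k hk hpre
                    by_cases hk11 : k = 11
                    · subst hk11
                      rw [show ("potted plant".toList).drop 11 = ['t'] from rfl,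
                        List.singleton_append,
                        show "television monitor".toList =
                          't' :: "elevision monitor".toList from rfl,
                        List.cons_prefix_cons] at hpre
                      exact hqcon (pvPreserve 'h' "and bag".toList "handbag".toList u
                        "elevision monitor".toList (by decide) hpre.2)
                    · have hk12 : k < 12 := hk
                      have hk10 : k < 11 := by omega
                      exact pvSafe_imp "television monitor".toList "potted plant".toList 11
                        (by decide) k hk10 _ hpre
                  show pvF4 (pvF3 (pvF2 (pvF1 ("potted plant".toList ++ u)))) ≠ _
                  rw [show pvF1 ("potted plant".toList ++ u) = "potted plant".toList ++ pvF1 u from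
                      pvRepl_append 'h' "and bag".toList "handbag".toList _ _
                        (fun k hk => pvSafe_imp "hand bag".toList "potted plant".toList 12
                          (by decide) k hk _),
                    show pvF2 ("potted plant".toList ++ pvF1 u) =
                        "potted plant".toList ++ pvF2 (pvF1 u) from
                      pvRepl_append 't' "elevision monitor".toList "tvmonitor".toList _ _ H2,
                    show pvF3 ("potted plant".toList ++ pvF2 (pvF1 u)) =
                        "potted plant".toList ++ pvF3 (pvF2 (pvF1 u)) from
                      pvRepl_append 'd' "ining table".toList "diningtable".toList _ _
                        (fun k hk => pvSafe_imp "dining table".toList "potted plant".toList 12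
                          (by decide) k hk _),
                    show pvF4 ("potted plant".toList ++ pvF3 (pvF2 (pvF1 u))) =
                        "pottedplant".toList ++ pvF4 (pvF3 (pvF2 (pvF1 u))) from
                      pvRepl_head 'p' "otted plant".toList "pottedplant".toList _,
                    show pvF4 (pvF3 (pvF2 (pvF1 u))) = pvComp u from rfl, pvScan_m4 u h1 h2 h3]
                  intro heq
                  exact ih u hlu hiu (List.append_cancel_left heq)
                · have hlt : t.length ≤ n := by
                    simp only [List.length_cons] at hl
                    omega
                  have hit : pvMagic <:+: t :=
                    pvInfix_tail hi (fun hp => h4 ((by decide :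
                      "potted plant".toList <+: pvMagic).trans hp))
                  have nh2 : ¬ "television monitor".toList <+: c :: pvF1 t := by
                    intro hc
                    rw [show "television monitor".toList = 't' :: "elevision monitor".toList
                        from rfl, List.cons_prefix_cons] at hc
                    have := pvPreserve 'h' "and bag".toList "handbag".toList t
                      "elevision monitor".toList (by decide) hc.2
                    exact h2 (by
                      rw [show "television monitor".toList = 't' :: "elevision monitor".toList
                        from rfl]
                      exact List.cons_prefix_cons.mpr ⟨hc.1, this⟩)
                  have nh3 : ¬ "dining table".toList <+: c :: pvF2 (pvF1 t) := by
                    intro hc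
                    rw [show "dining table".toList = 'd' :: "ining table".toList from rfl,
                      List.cons_prefix_cons] at hc
                    have s2 := pvPreserve 't' "elevision monitor".toList "tvmonitor".toList
                      (pvF1 t) "ining table".toList (by decide) hc.2
                    have s1 := pvPreserve 'h' "and bag".toList "handbag".toList t
                      "ining table".toList (by decide) s2
                    exact h3 (by
                      rw [show "dining table".toList = 'd' :: "ining table".toList from rfl]
                      exact List.cons_prefix_cons.mpr ⟨hc.1, s1⟩)
                  have nh4 : ¬ "potted plant".toList <+: c :: pvF3 (pvF2 (pvF1 t)) := by
                    intro hc
                    rw [show "potted plant".toList = 'p' :: "otted plant".toList from rfl,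
                      List.cons_prefix_cons] at hc
                    have s3 := pvPreserve 'd' "ining table".toList "diningtable".toList
                      (pvF2 (pvF1 t)) "otted plant".toList (by decide) hc.2
                    have s2 := pvPreserve 't' "elevision monitor".toList "tvmonitor".toList
                      (pvF1 t) "otted plant".toList (by decide) s3
                    have s1 := pvPreserve 'h' "and bag".toList "handbag".toList t
                      "otted plant".toList (by decide) s2
                    exact h4 (by
                      rw [show "potted plant".toList = 'p' :: "otted plant".toList from rfl]
                      exact List.cons_prefix_cons.mpr ⟨hc.1, s1⟩)
                  show pvF4 (pvF3 (pvF2 (pvF1 (c :: t)))) ≠ _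
                  rw [show pvF1 (c :: t) = c :: pvF1 t from pvRepl_neg _ _ _ _ _ h1,
                    show pvF2 (c :: pvF1 t) = c :: pvF2 (pvF1 t) from pvRepl_neg _ _ _ _ _ nh2,
                    show pvF3 (c :: pvF2 (pvF1 t)) = c :: pvF3 (pvF2 (pvF1 t)) from
                      pvRepl_neg _ _ _ _ _ nh3,
                    show pvF4 (c :: pvF3 (pvF2 (pvF1 t))) = c :: pvF4 (pvF3 (pvF2 (pvF1 t))) from
                      pvRepl_neg _ _ _ _ _ nh4,
                    show pvF4 (pvF3 (pvF2 (pvF1 t))) = pvComp t from rfl,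
                    pvScan_none c t h1 h2 h3 h4]
                  intro heq
                  injection heq with _ h6
                  exact ih t hlt hit h6
  intro s hi
  exact aux s.length s le_rfl hi

-- ===== VERDICT (by name: the statement is the Claim_ definition above) =====
theorem replace_certain_words_spec : Claim_unchanged_replace_certain_words := by
  intro _sent _
  unfold Spec_replace_certain_words
  intro hnd
  have hinf : ¬ pvMagic <:+: _sent.toList := by
    intro hi
    exact hnd (by
      unfold D_replace_certain_words
      rw [PySem.Str.isIn_iff_infix]
      exact hi)
  apply String.toList_injective
  simp only [replace_certain_words, pvReplaceMap, List.foldl_cons, List.foldl_nil,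
    PySem.Str.toList_replace, replace_certain_words_alt, String.toList_ofList]
  rw [pvJoin_toList,
    show ∀ x, PySem.Chars.replace x "hand bag".toList "handbag".toList = pvF1 x from
      fun x => pvReplace_eq 'h' "and bag".toList "handbag".toList x,
    show ∀ x, PySem.Chars.replace x "television monitor".toList "tvmonitor".toList = pvF2 x from
      fun x => pvReplace_eq 't' "elevision monitor".toList "tvmonitor".toList x,
    show ∀ x, PySem.Chars.replace x "dining table".toList "diningtable".toList = pvF3 x from
      fun x => pvReplace_eq 'd' "ining table".toList "diningtable".toList x,
    show ∀ x, PySem.Chars.replace x "potted plant".toList "pottedplant".toList = pvF4 x from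
      fun x => pvReplace_eq 'p' "otted plant".toList "pottedplant".toList x]
  exact pvMain _sent.toList hinf

theorem replace_certain_words_changed : Claim_changed_replace_certain_words := by
  unfold Claim_changed_replace_certain_words
  refine ⟨by decide, by decide,
    String.toList_injective (by
      simp only [replace_certain_words, pvReplaceMap, List.foldl, PySem.Str.toList_replace]
      rw [pvJoin_toList]
      decide),
    String.toList_injective (by
      simp only [replace_certain_words_alt, String.toList_ofList]
      rw [pvJoin_toList]
      simp [pvDiffWitness_replace_certain_words, pvDiffWitnessOut_replace_certain_words, pvScan, pvFirstMatch, pvRepsB]),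
    fun h => ?_⟩
  have := congrArg String.toList h
  revert this; decide

theorem replace_certain_words_tight : Claim_exact_replace_certain_words := by
  intro _sent _ hd
  have hinf : pvMagic <:+: _sent.toList := by
    unfold D_replace_certain_words at hd
    rw [PySem.Str.isIn_iff_infix] at hd
    exact hd
  intro heq
  have h' := congrArg String.toList heq
  simp only [replace_certain_words, pvReplaceMap, List.foldl_cons, List.foldl_nil,
    PySem.Str.toList_replace, replace_certain_words_alt, String.toList_ofList] at h'
  rw [pvJoin_toList,
    show ∀ x, PySem.Chars.replace x "hand bag".toList "handbag".toList = pvF1 x from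
      fun x => pvReplace_eq 'h' "and bag".toList "handbag".toList x,
    show ∀ x, PySem.Chars.replace x "television monitor".toList "tvmonitor".toList = pvF2 x from
      fun x => pvReplace_eq 't' "elevision monitor".toList "tvmonitor".toList x,
    show ∀ x, PySem.Chars.replace x "dining table".toList "diningtable".toList = pvF3 x from
      fun x => pvReplace_eq 'd' "ining table".toList "diningtable".toList x,
    show ∀ x, PySem.Chars.replace x "potted plant".toList "pottedplant".toList = pvF4 x from
      fun x => pvReplace_eq 'p' "otted plant".toList "pottedplant".toList x] at h'
  exact pvTight _sent.toList hinf h'
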